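-- pv_equiv track=rewrite | github.com/ericskim/redax | vpax/spaces.py | increment_bv
-- ===== SOURCE A (Python) =====
-- def _bintogray(x:int):
--     """
--     Converts a binary encoded positive integer into gray code
--     """
--     assert x >= 0
--     return x ^ (x >> 1)
--
-- def _graytobin(x:int):
--     """
--     Converts a gray code encoded positive integer into the standard binary encoding
--     """
--     assert x >= 0
--     mask = x >> 1
--     while(mask != 0):
--         x = x ^ mask
--         mask = mask >> 1
--     return x
--
-- def _int2bv(index:int, nbits:int):
--     """
--     A really high nbits just right pads the bitvector with "False"
--     """
--
--     return tuple(True if ((index >> i) % 2 == 1) else False for i in range(nbits-1,-1,-1))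
--
-- def _bv2int(bv):
--     """
--     Converts bitvector (list or tuple) with the standard binary encoding into an integer
--     """
--     nbits = len(bv)
--     index = 0
--     for i in range(nbits):
--         if bv[i]:
--             index += 2**(nbits - i - 1)
--     return index
--
-- def increment_bv(bv, increment, graycode = False, saturate = False):
--     """
--     Increment a bitvector's value +1 or -1.
--     """
--     assert increment == 1 or increment == -1
--     nbits = len(bv)
--     if graycode:
--         index = _graytobin(_bv2int(bv))
--         index = (index+increment) % 2**nbits
--         return _int2bv( _bintogray(index), nbits)
--     else:
--         if bv == tuple(True for i in range(nbits)) and increment > 0: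
--             if saturate:
--                 return bv
--             raise ValueError("Bitvector overflow for nonperiodic domain.")
--         if bv == tuple(False for i in range(nbits)) and increment < 0:
--             if saturate:
--                 return bv
--             raise ValueError("Bitvector overflow for nonperiodic domain.")
--         return _int2bv(_bv2int(bv) + increment, nbits)
-- ===== SOURCE B (Python) =====
-- def _ripple_rev(rbits, inc):
--     """Add inc (+1/-1) to LSB-first bits; returns (new bits, carry/borrow out of the top)."""
--     out = []
--     carry = True
--     for b in rbits:
--         if carry:
--             out.append(not b)
--             carry = b if inc == 1 else not b
--         else:
--             out.append(b)
--     return out, carry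
--
-- def _gray_decode(bits):
--     """Prefix-XOR scan (MSB-first gray -> binary)."""
--     out = []
--     acc = False
--     for g in bits:
--         acc = acc ^ g
--         out.append(acc)
--     return out
--
-- def _gray_encode(bits):
--     """binary -> gray: out[i] = bin[i] ^ bin[i-1] (MSB-first, bin[-1] = 0)."""
--     out = []
--     prev = False
--     for b in bits:
--         out.append(b ^ prev)
--         prev = b
--     return out
--
-- def increment_bv(bv, increment, graycode=False, saturate=False):
--     """
--     Increment a bitvector's value +1 or -1, working directly on the bits
--     (no integer conversion): gray code wraps; plain binary saturates or
--     overflows at the ends.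
--     """
--     assert increment == 1 or increment == -1
--     if graycode:
--         binb = _gray_decode(list(bv))
--         out, _ = _ripple_rev(list(reversed(binb)), increment)
--         return tuple(_gray_encode(list(reversed(out))))
--     else:
--         out, carry = _ripple_rev(list(reversed(list(bv))), increment)
--         if carry:
--             if saturate:
--                 return tuple(bv)
--             raise ValueError("Bitvector overflow for nonperiodic domain.")
--         return tuple(reversed(out))
-- ===== Notes on version B (the rewrite author's own statement) =====
-- stated objective: alternative
-- what changed: B replaces A's bitvector->big-integer->bitvector round trip (gray/binary integer conversions plus a per-bit shift loop to rebuild the tuple) by direct single-pass list work: one ripple-carry/borrow pass over the reversed bits whose final carry detects the binary overflow (saturate or raise, as in A), and prefix-XOR scans to decode/re-encode gray code, which always wraps.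
import Mathlib
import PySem

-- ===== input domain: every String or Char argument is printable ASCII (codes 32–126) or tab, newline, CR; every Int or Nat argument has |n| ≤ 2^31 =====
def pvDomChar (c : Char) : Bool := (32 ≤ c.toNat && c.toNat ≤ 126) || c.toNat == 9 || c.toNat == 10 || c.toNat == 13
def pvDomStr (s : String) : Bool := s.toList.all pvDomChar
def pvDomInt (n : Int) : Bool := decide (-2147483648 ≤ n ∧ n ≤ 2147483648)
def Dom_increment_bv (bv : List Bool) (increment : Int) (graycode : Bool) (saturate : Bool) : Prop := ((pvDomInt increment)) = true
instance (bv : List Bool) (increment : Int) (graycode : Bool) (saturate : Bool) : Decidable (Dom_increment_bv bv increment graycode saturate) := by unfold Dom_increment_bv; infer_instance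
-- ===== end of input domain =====

-- B replaces A's bitvector→bigint→bitvector round trip by direct ripple-carry / prefix-XOR work
-- on the bit list (objective: alternative decomposition of the same wrap-around increment).

-- ===== PORT A =====

-- _bintogray: x ^ (x >> 1); argument is a nonnegative int (Nat here, exact on A's call site)
def pvBintogray (x : Nat) : Nat := x ^^^ (x >>> 1)

-- the while-loop of _graytobin: while mask != 0: x ^= mask; mask >>= 1
def pvGraytobinGo (x : Nat) (mask : Nat) : Nat :=
  if mask = 0 then x else pvGraytobinGo (x ^^^ mask) (mask >>> 1)
termination_by mask
decreasing_by simpa [Nat.shiftRight_one] using Nat.div_lt_self (Nat.pos_of_ne_zero (by assumption)) (by norm_num)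

def pvGraytobin (x : Nat) : Nat := pvGraytobinGo x (x >>> 1)

-- _int2bv: range(nbits-1,-1,-1) enumerates nbits-1 … 0; Python's x >> i on ints is
-- floor-division by 2^i and (… ) % 2 is Python mod — ported with PySem.Int (exact).
def pvInt2bv (index : Int) (nbits : Nat) : List Bool :=
  (List.range nbits).reverse.map
    (fun i => decide (PySem.Int.mod (PySem.Int.floordiv index (2 ^ i)) 2 = 1))

-- _bv2int: for i in range(nbits): if bv[i]: index += 2**(nbits-i-1)
def pvBv2int (bv : List Bool) : Nat :=
  (List.range bv.length).foldl
    (fun (index : Nat) (i : Nat) =>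
      if (PySem.List.pyGet? bv (i : Int)).getD false then index + 2 ^ (bv.length - i - 1)
      else index) 0

-- The binary branch saturates or raises on overflow; the raise (ValueError, and the
-- AssertionError for increment outside {1,-1}) is excluded by Pre_ below ([] is returned
-- on those unreachable-under-Pre_ paths).  tuple(True for i in range(nbits)) is
-- List.replicate nbits true.
def increment_bv (bv : List Bool) (increment : Int) (graycode : Bool) (saturate : Bool) : List Bool :=
  let nbits := bv.length
  if graycode then
    let index : Int := (pvGraytobin (pvBv2int bv) : Nat)
    let index : Int := PySem.Int.mod (index + increment) (2 ^ nbits)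
    -- index ≥ 0 here (Python mod with positive modulus), so .toNat is exact
    pvInt2bv ((pvBintogray index.toNat : Nat) : Int) nbits
  else
    if bv = List.replicate nbits true ∧ 0 < increment then
      if saturate then bv else []  -- raise ValueError (outside Pre_)
    else if bv = List.replicate nbits false ∧ increment < 0 then
      if saturate then bv else []  -- raise ValueError (outside Pre_)
    else
      pvInt2bv (((pvBv2int bv : Nat) : Int) + increment) nbits

-- ===== PORT B =====

-- _ripple_rev: one pass over LSB-first bits with a carry/borrow flag; also returns
-- the carry out of the top bit (true = overflow past the end)
def pvRippleRev (inc : Int) : Bool → List Bool → List Bool × Bool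
  | carry, [] => ([], carry)
  | carry, b :: rest =>
    if carry then
      let r := pvRippleRev inc (if inc = 1 then b else !b) rest
      ((!b) :: r.1, r.2)
    else
      let r := pvRippleRev inc false rest
      (b :: r.1, r.2)

-- _gray_decode: prefix-XOR scan, MSB-first
def pvGrayDecode : Bool → List Bool → List Bool
  | _, [] => []
  | acc, g :: rest => (xor acc g) :: pvGrayDecode (xor acc g) rest

-- _gray_encode: out[i] = bin[i] ^ bin[i-1], MSB-first
def pvGrayEncode : Bool → List Bool → List Bool
  | _, [] => []
  | prev, b :: rest => (xor b prev) :: pvGrayEncode b rest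

def increment_bv_alt (bv : List Bool) (increment : Int) (graycode : Bool) (saturate : Bool) : List Bool :=
  if graycode then
    let binb := pvGrayDecode false bv
    let binb := (pvRippleRev increment true binb.reverse).1.reverse
    pvGrayEncode false binb
  else
    let r := pvRippleRev increment true bv.reverse
    if r.2 then
      if saturate then bv else []  -- raise ValueError (outside Pre_)
    else
      r.1.reverse

-- ===== PRECONDITION & SPEC =====
-- Python A raises AssertionError unless increment ∈ {1,-1}, and in the non-gray,
-- non-saturating branch raises ValueError when the all-ones vector is incremented or the
-- all-zeros vector (including the empty one) is decremented; Pre_ excludes exactly those raises.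
def Pre_increment_bv (bv : List Bool) (increment : Int) (graycode : Bool) (saturate : Bool) : Prop :=
  (increment = 1 ∨ increment = -1) ∧
  (graycode = true ∨ saturate = true ∨
    ¬((increment = 1 ∧ bv.all (fun b => b)) ∨ (increment = -1 ∧ bv.all (fun b => !b))))
instance (bv : List Bool) (increment : Int) (graycode : Bool) (saturate : Bool) : Decidable (Pre_increment_bv bv increment graycode saturate) := by unfold Pre_increment_bv; infer_instance

def pvWitness_increment_bv : List Bool × Int × Bool × Bool := ([true, false, true], 1, true, false)

def Spec_increment_bv (bv : List Bool) (increment : Int) (graycode : Bool) (saturate : Bool) (out : List Bool) : Prop := out = increment_bv_alt bv increment graycode saturate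
instance (bv : List Bool) (increment : Int) (graycode : Bool) (saturate : Bool) (out : List Bool) : Decidable (Spec_increment_bv bv increment graycode saturate out) := by unfold Spec_increment_bv; infer_instance

-- ===== CLAIM (what is proved, stated in full; the proofs are below) =====
def Claim_equal_increment_bv : Prop := ∀ (bv : List Bool) (increment : Int) (graycode : Bool) (saturate : Bool), Dom_increment_bv bv increment graycode saturate → Pre_increment_bv bv increment graycode saturate → Spec_increment_bv bv increment graycode saturate (increment_bv bv increment graycode saturate)

-- ===== LEMMAS AND PROOFS =====

-- value of an LSB-first bit list
def pvValL : List Bool → Nat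
  | [] => 0
  | b :: t => b.toNat + 2 * pvValL t

-- n low bits of m, LSB-first
def pvBitsL : Nat → Nat → List Bool
  | 0, _ => []
  | n+1, m => decide (m % 2 = 1) :: pvBitsL n (m / 2)

-- gray-to-binary on numbers: g2b x = x ^ (x>>1) ^ (x>>2) ^ …
def pvG2b (x : Nat) : Nat :=
  if h : x = 0 then 0 else x ^^^ pvG2b (x / 2)
termination_by x
decreasing_by exact Nat.div_lt_self (Nat.pos_of_ne_zero h) one_lt_two

lemma pvValL_lt : ∀ l : List Bool, pvValL l < 2 ^ l.length := by
  intro l; induction l with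
  | nil => simp [pvValL]
  | cons b t ih =>
    have h2 : 2 ^ (b :: t).length = 2 * 2 ^ t.length := by
      simp [List.length_cons, pow_succ]; ring
    cases b <;> simp [pvValL] <;> omega

lemma pvBitsL_valL : ∀ l : List Bool, pvBitsL l.length (pvValL l) = l := by
  intro l; induction l with
  | nil => simp [pvBitsL]
  | cons b t ih =>
    have h1 : (b.toNat + 2 * pvValL t) % 2 = b.toNat := by cases b <;> simp <;> omega
    have h2 : (b.toNat + 2 * pvValL t) / 2 = pvValL t := by cases b <;> simp <;> omega
    simp only [List.length_cons, pvValL, pvBitsL, h1, h2, ih]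
    cases b <;> simp

lemma pvBitsL_map : ∀ (n : Nat) (m : Nat),
    pvBitsL n m = (List.range n).map (fun i => decide ((m / 2 ^ i) % 2 = 1)) := by
  intro n; induction n with
  | zero => intro m; simp [pvBitsL]
  | succ n ih =>
    intro m
    rw [List.range_succ_eq_map]
    simp only [List.map_cons, List.map_map, pvBitsL, pow_zero, Nat.div_one]
    congr 1
    rw [ih (m / 2)]
    apply List.map_congr_left
    intro i _
    simp only [Function.comp_apply]
    congr 2
    rw [Nat.div_div_eq_div_mul, pow_succ, mul_comm (2 ^ i) 2, ← Nat.div_div_eq_div_mul]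

lemma pvValL_append : ∀ (xs : List Bool) (c : Bool),
    pvValL (xs ++ [c]) = pvValL xs + c.toNat * 2 ^ xs.length := by
  intro xs c; induction xs with
  | nil => simp [pvValL]
  | cons b t ih =>
    simp only [List.cons_append, pvValL, ih, List.length_cons, pow_succ]
    ring

lemma pvXorDouble (x y : Nat) (r s : Bool) :
    (2 * x + r.toNat) ^^^ (2 * y + s.toNat) = 2 * (x ^^^ y) + (r != s).toNat := by
  have h := Nat.xor_bit r x s y
  cases r <;> cases s <;> simpa [Nat.bit, Nat.mul_comm] using h

lemma pvXorDecomp (a b : Nat) :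
    a ^^^ b = 2 * (a / 2 ^^^ b / 2) + ((decide (a % 2 = 1)) != (decide (b % 2 = 1))).toNat := by
  have ha : 2 * (a / 2) + (decide (a % 2 = 1)).toNat = a := by
    rcases Nat.mod_two_eq_zero_or_one a with h | h <;> simp [h] <;> omega
  have hb : 2 * (b / 2) + (decide (b % 2 = 1)).toNat = b := by
    rcases Nat.mod_two_eq_zero_or_one b with h | h <;> simp [h] <;> omega
  have h := pvXorDouble (a / 2) (b / 2) (decide (a % 2 = 1)) (decide (b % 2 = 1))
  rw [ha, hb] at h
  exact h

lemma pvXorLt : ∀ (n a b : Nat), a < 2 ^ n → b < 2 ^ n → a ^^^ b < 2 ^ n := by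
  intro n; induction n with
  | zero => intro a b ha hb; interval_cases a; interval_cases b; simp
  | succ n ih =>
    intro a b ha hb
    have h2 : 2 ^ (n + 1) = 2 * 2 ^ n := by ring
    rw [pvXorDecomp]
    have := ih (a / 2) (b / 2) (by omega) (by omega)
    have hbit : ((decide (a % 2 = 1)) != (decide (b % 2 = 1))).toNat ≤ 1 := Bool.toNat_le _
    omega

lemma pvXorTwoPow : ∀ (n a : Nat), a < 2 ^ n → a ^^^ 2 ^ n = a + 2 ^ n := by
  intro n; induction n with
  | zero => intro a ha; interval_cases a; simp
  | succ n ih =>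
    intro a ha
    have h2 : 2 ^ (n + 1) = 2 * 2 ^ n := by ring
    have hdiv : 2 ^ (n + 1) / 2 = 2 ^ n := by omega
    have hmod : 2 ^ (n + 1) % 2 = 0 := by omega
    have hx : (decide (a % 2 = 1) != decide (2 ^ (n + 1) % 2 = 1)) = decide (a % 2 = 1) := by
      rw [hmod]; simp
    have hbit : (decide (a % 2 = 1)).toNat = a % 2 := by
      rcases Nat.mod_two_eq_zero_or_one a with h | h <;> simp [h]
    have ihh := ih (a / 2) (by omega)
    rw [pvXorDecomp, hdiv, hx, hbit, ihh]
    omega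

lemma pvAddHigh (n a : Nat) (c : Bool) (h : a < 2 ^ n) :
    a + c.toNat * 2 ^ n = a ^^^ c.toNat * 2 ^ n := by
  cases c
  · simp
  · simpa using (pvXorTwoPow n a h).symm

lemma pvPowXor (n : Nat) : 2 ^ n ^^^ (2 ^ n - 1) = 2 ^ (n + 1) - 1 := by
  have h := pvXorTwoPow n (2 ^ n - 1) (by have := Nat.one_le_two_pow (n := n); omega)
  have h2 : 2 ^ (n + 1) = 2 * 2 ^ n := by ring
  have hp := Nat.one_le_two_pow (n := n)
  rw [Nat.xor_comm] at h
  omega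

lemma pvG2b_zero : pvG2b 0 = 0 := by rw [pvG2b]; rfl

lemma pvG2b_def (x : Nat) : pvG2b x = x ^^^ pvG2b (x / 2) := by
  by_cases h : x = 0
  · subst h; simp [pvG2b_zero]
  · rw [pvG2b]; simp [h]

lemma pvG2b_lt : ∀ (x n : Nat), x < 2 ^ n → pvG2b x < 2 ^ n := by
  intro x
  induction x using Nat.strong_induction_on with
  | _ x ih =>
    intro n hx
    by_cases h0 : x = 0
    · subst h0; rw [pvG2b_zero]; exact Nat.two_pow_pos n
    · rw [pvG2b_def]
      exact pvXorLt n _ _ hx (ih (x / 2) (Nat.div_lt_self (Nat.pos_of_ne_zero h0) one_lt_two) n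
        (lt_of_le_of_lt (Nat.div_le_self x 2) hx))

lemma pvG2b_add_pow : ∀ (n v : Nat), v < 2 ^ n → pvG2b (v + 2 ^ n) = pvG2b v ^^^ (2 ^ (n + 1) - 1) := by
  intro n; induction n with
  | zero =>
    intro v hv; interval_cases v
    have h1 : pvG2b 1 = 1 := by rw [pvG2b_def]; norm_num [pvG2b_zero]
    norm_num [pvG2b_zero, h1]
  | succ n ih =>
    intro v hv
    have h2 : 2 ^ (n + 1) = 2 * 2 ^ n := by ring
    rw [pvG2b_def]
    have hdiv : (v + 2 ^ (n + 1)) / 2 = v / 2 + 2 ^ n := by omega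
    rw [hdiv, ih (v / 2) (by omega)]
    have hadd : v + 2 ^ (n + 1) = v ^^^ 2 ^ (n + 1) := (pvXorTwoPow (n + 1) v hv).symm
    rw [hadd, pvG2b_def v, ← pvPowXor (n + 1)]
    rw [Nat.xor_assoc, Nat.xor_assoc]
    congr 1
    rw [← Nat.xor_assoc, Nat.xor_comm (2 ^ (n + 1)) (pvG2b (v / 2)), Nat.xor_assoc]

-- combining the top power with the low all-ones mask
lemma pvHighFlip (m G : Nat) (hG : G < 2 ^ m) :
    (G ^^^ (2 ^ m - 1)) + 2 ^ m = G ^^^ (2 ^ (m + 1) - 1) := by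
  have h1 : G ^^^ (2 ^ m - 1) < 2 ^ m :=
    pvXorLt m _ _ hG (by have := Nat.one_le_two_pow (n := m); omega)
  rw [← pvXorTwoPow m _ h1, Nat.xor_assoc, Nat.xor_comm (2 ^ m - 1) (2 ^ m), pvPowXor]

-- ripple lemmas
lemma pvRippleRev_false : ∀ (inc : Int) (l : List Bool), pvRippleRev inc false l = (l, false) := by
  intro inc l; induction l with
  | nil => rfl
  | cons b t ih => simp [pvRippleRev, ih]

lemma pvRippleRev_length : ∀ (inc : Int) (c : Bool) (l : List Bool),
    (pvRippleRev inc c l).1.length = l.length := by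
  intro inc c l; induction l generalizing c with
  | nil => rfl
  | cons b t ih => by_cases hc : c = true <;> simp [pvRippleRev, hc, ih]

lemma pvCarry_one : ∀ l : List Bool, (pvRippleRev 1 true l).2 = l.all (fun b => b) := by
  intro l; induction l with
  | nil => rfl
  | cons b t ih =>
    cases b
    · norm_num [pvRippleRev, pvRippleRev_false]
    · norm_num [pvRippleRev, ih]

lemma pvCarry_neg : ∀ l : List Bool, (pvRippleRev (-1) true l).2 = l.all (fun b => !b) := by
  intro l; induction l with
  | nil => rfl
  | cons b t ih =>
    cases b
    · norm_num [pvRippleRev, ih]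
    · norm_num [pvRippleRev, pvRippleRev_false]

lemma pvModOdd (a b : Nat) (hb : 0 < b) : (2 * a + 1) % (2 * b) = 2 * (a % b) + 1 := by
  conv_lhs => rw [← Nat.div_add_mod a b]
  have h : 2 * (b * (a / b) + a % b) + 1 = (2 * (a % b) + 1) + (a / b) * (2 * b) := by ring
  rw [h, Nat.add_mul_mod_self_right, Nat.mod_eq_of_lt (by have := Nat.mod_lt a hb; omega)]

lemma pvRipple_one : ∀ l : List Bool,
    pvValL (pvRippleRev 1 true l).1 = (pvValL l + 1) % 2 ^ l.length := by
  intro l; induction l with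
  | nil => simp [pvRippleRev, pvValL]
  | cons b t ih =>
    have h2 : 2 ^ (t.length + 1) = 2 * 2 ^ t.length := by ring
    have hv := pvValL_lt t
    cases b
    · have hstep : (pvRippleRev 1 true (false :: t)).1 = true :: t := by
        norm_num [pvRippleRev, pvRippleRev_false]
      rw [hstep]
      simp only [pvValL, List.length_cons, Bool.toNat_false, Bool.toNat_true]
      rw [Nat.mod_eq_of_lt (show 0 + 2 * pvValL t + 1 < 2 ^ (t.length + 1) by omega)]
      omega
    · have hstep : (pvRippleRev 1 true (true :: t)).1 = false :: (pvRippleRev 1 true t).1 := by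
        norm_num [pvRippleRev]
      rw [hstep]
      simp only [pvValL, List.length_cons, ih, Bool.toNat_false, Bool.toNat_true]
      rw [show (1 : Nat) + 2 * pvValL t + 1 = 2 * (pvValL t + 1) by ring, h2,
        Nat.mul_mod_mul_left]
      omega

lemma pvRipple_neg : ∀ l : List Bool,
    pvValL (pvRippleRev (-1) true l).1 = (pvValL l + (2 ^ l.length - 1)) % 2 ^ l.length := by
  intro l; induction l with
  | nil => simp [pvRippleRev, pvValL]
  | cons b t ih =>
    have h2 : 2 ^ (t.length + 1) = 2 * 2 ^ t.length := by ring
    have hp := Nat.one_le_two_pow (n := t.length)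
    have hv := pvValL_lt t
    cases b
    · have hstep : (pvRippleRev (-1) true (false :: t)).1 = true :: (pvRippleRev (-1) true t).1 := by
        norm_num [pvRippleRev]
      rw [hstep]
      simp only [pvValL, List.length_cons, ih, Bool.toNat_false, Bool.toNat_true]
      rw [show 0 + 2 * pvValL t + (2 ^ (t.length + 1) - 1)
          = 2 * (pvValL t + (2 ^ t.length - 1)) + 1 by omega, h2,
        pvModOdd _ _ (by omega)]
      omega
    · have hstep : (pvRippleRev (-1) true (true :: t)).1 = false :: t := by
        norm_num [pvRippleRev, pvRippleRev_false]
      rw [hstep]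
      simp only [pvValL, List.length_cons, Bool.toNat_false, Bool.toNat_true]
      rw [show 1 + 2 * pvValL t + (2 ^ (t.length + 1) - 1)
          = 2 * (pvValL t + 2 ^ t.length) by omega, h2, Nat.mul_mod_mul_left,
        Nat.add_mod_right, Nat.mod_eq_of_lt hv]
      omega

-- decode / encode lemmas
lemma pvGrayDecode_length : ∀ (acc : Bool) (l : List Bool),
    (pvGrayDecode acc l).length = l.length := by
  intro acc l; induction l generalizing acc with
  | nil => rfl
  | cons b t ih => simp [pvGrayDecode, ih]

lemma pvGrayEncode_length : ∀ (prev : Bool) (l : List Bool),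
    (pvGrayEncode prev l).length = l.length := by
  intro prev l; induction l generalizing prev with
  | nil => rfl
  | cons b t ih => simp [pvGrayEncode, ih]

lemma pvDecode_val : ∀ (l : List Bool) (acc : Bool),
    pvValL ((pvGrayDecode acc l).reverse)
      = pvG2b (pvValL l.reverse) ^^^ (if acc then 2 ^ l.length - 1 else 0) := by
  intro l; induction l with
  | nil => intro acc; cases acc <;> simp [pvGrayDecode, pvValL, pvG2b_zero]
  | cons b t ih =>
    intro acc
    have hvt : pvValL t.reverse < 2 ^ t.length := by
      simpa using pvValL_lt t.reverse
    have hg := pvG2b_lt (pvValL t.reverse) t.length hvt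
    have hp := Nat.one_le_two_pow (n := t.length)
    have hflip := pvHighFlip t.length (pvG2b (pvValL t.reverse)) hg
    have h2 : 2 ^ (t.length + 1) = 2 * 2 ^ t.length := by ring
    simp only [pvGrayDecode, List.reverse_cons]
    rw [pvValL_append, pvValL_append, ih (xor acc b)]
    simp only [List.length_reverse, pvGrayDecode_length, List.length_cons]
    cases b <;> cases acc <;> norm_num
    · -- b = false, acc = true
      exact hflip
    · -- b = true, acc = false
      rw [pvG2b_add_pow t.length _ hvt]
      simpa using hflip
    · -- b = true, acc = true
      rw [pvG2b_add_pow t.length _ hvt, Nat.xor_assoc, Nat.xor_self, Nat.xor_zero]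

lemma pvEncode_val : ∀ (l : List Bool) (prev : Bool),
    pvValL ((pvGrayEncode prev l).reverse)
      = pvValL l.reverse ^^^ ((pvValL l.reverse + (if prev then 2 ^ l.length else 0)) / 2) := by
  intro l; induction l with
  | nil => intro prev; cases prev <;> simp [pvGrayEncode, pvValL]
  | cons b t ih =>
    intro prev
    have hvt : pvValL t.reverse < 2 ^ t.length := by simpa using pvValL_lt t.reverse
    have h2 : 2 ^ (t.length + 1) = 2 * 2 ^ t.length := by ring
    have hb2 : b.toNat * 2 ^ t.length ≤ 2 ^ t.length := by cases b <;> simp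
    have hw : (pvValL t.reverse + b.toNat * 2 ^ t.length) / 2 < 2 ^ t.length := by omega
    have hxw : pvValL t.reverse ^^^ (pvValL t.reverse + b.toNat * 2 ^ t.length) / 2
        < 2 ^ t.length := pvXorLt _ _ _ hvt hw
    simp only [pvGrayEncode, List.reverse_cons]
    rw [pvValL_append, pvValL_append, ih b]
    simp only [List.length_reverse, pvGrayEncode_length, List.length_cons]
    have hbif : (pvValL t.reverse + if b = true then 2 ^ t.length else 0)
        = pvValL t.reverse + b.toNat * 2 ^ t.length := by cases b <;> simp
    have hdiv : (pvValL t.reverse + b.toNat * 2 ^ t.length +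
        (if prev = true then 2 ^ (t.length + 1) else 0)) / 2
        = (pvValL t.reverse + b.toNat * 2 ^ t.length) / 2 + prev.toNat * 2 ^ t.length := by
      cases prev <;> simp <;> omega
    rw [hbif, hdiv]
    set w := (pvValL t.reverse + b.toNat * 2 ^ t.length) / 2 with hwdef
    rw [pvAddHigh t.length _ (xor b prev) hxw]
    rw [pvAddHigh t.length _ b hvt, pvAddHigh t.length _ prev hw]
    rw [Nat.xor_assoc, Nat.xor_assoc]
    congr 1
    rw [← Nat.xor_assoc, Nat.xor_comm (b.toNat * 2 ^ t.length) w, Nat.xor_assoc]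
    congr 1
    cases b <;> cases prev <;> simp

-- pvBv2int as a value
lemma pvFoldSum (g : Nat → Nat) : ∀ (n : Nat) (a : Nat),
    (List.range n).foldl (fun acc i => acc + g i) a = a + ∑ i ∈ Finset.range n, g i := by
  intro n; induction n with
  | zero => intro a; simp
  | succ n ih =>
    intro a
    rw [List.range_succ, List.foldl_append, Finset.sum_range_succ, ih]
    simp [Nat.add_assoc]

lemma pvValL_sum : ∀ l : List Bool,
    pvValL l = ∑ i ∈ Finset.range l.length, if l.getD i false then 2 ^ i else 0 := by
  intro l; induction l with
  | nil => simp [pvValL]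
  | cons b t ih =>
    rw [List.length_cons, Finset.sum_range_succ']
    simp only [List.getD_cons_succ, List.getD_cons_zero, pow_zero]
    have : ∀ i : Nat, (if t.getD i false then 2 ^ (i + 1) else 0)
        = 2 * (if t.getD i false then 2 ^ i else 0) := by
      intro i; split <;> ring
    simp only [this, ← Finset.mul_sum, ← ih]
    cases b <;> simp [pvValL] <;> ring

lemma pvBv2int_eq : ∀ bv : List Bool, pvBv2int bv = pvValL bv.reverse := by
  intro bv
  have hfun : (fun (index : Nat) (i : Nat) =>
      if (PySem.List.pyGet? bv (i : Int)).getD false then index + 2 ^ (bv.length - i - 1)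
      else index)
      = fun (acc : Nat) (i : Nat) => acc + (if bv.getD i false then 2 ^ (bv.length - i - 1) else 0) := by
    funext a i
    rw [PySem.List.pyGet?_natCast, List.getD_eq_getElem?_getD]
    split <;> simp
  rw [pvBv2int, hfun, pvFoldSum, Nat.zero_add]
  rw [pvValL_sum]
  simp only [List.length_reverse]
  rw [← Finset.sum_range_reflect]
  apply Finset.sum_congr rfl
  intro i hi
  rw [Finset.mem_range] at hi
  have hgd : bv.reverse.getD i false = bv.getD (bv.length - 1 - i) false := by
    rw [List.getD_eq_getElem?_getD, List.getD_eq_getElem?_getD, List.getElem?_reverse hi]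
  rw [hgd, show bv.length - (bv.length - 1 - i) - 1 = i from by omega]

-- pvInt2bv via pvBitsL
lemma pvCastDivMod (M i : Nat) : ((M : Int)) / 2 ^ i % 2 = ((M / 2 ^ i % 2 : Nat) : Int) := by
  push_cast
  ring

lemma pvIntBit (x : Int) (n i : Nat) (hi : i < n) :
    PySem.Int.mod (PySem.Int.floordiv x (2 ^ i)) 2
      = (((PySem.Int.mod x (2 ^ n)).toNat / 2 ^ i) % 2 : Nat) := by
  rw [PySem.Int.mod_eq_emod_of_pos (by positivity),
    PySem.Int.floordiv_eq_ediv_of_pos (by positivity),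
    PySem.Int.mod_eq_emod_of_pos (by positivity)]
  have hM : (((x % (2 ^ n)).toNat : Nat) : Int) = x % (2 ^ n) :=
    Int.toNat_of_nonneg (Int.emod_nonneg x (by positivity))
  set M : Nat := (x % (2 ^ n)).toNat with hMdef
  have h1 : (2 : Int) ^ (n - i) * 2 ^ i = 2 ^ n := by
    rw [← pow_add]; congr 1; omega
  have h3 : (2 : Int) ^ (n - i) * (x / 2 ^ n) * 2 ^ i = 2 ^ n * (x / 2 ^ n) := by
    rw [mul_right_comm, h1]
  have hsplit : x = (M : Int) + 2 ^ (n - i) * (x / 2 ^ n) * 2 ^ i := by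
    rw [hM, h3]
    linarith [Int.emod_add_ediv x (2 ^ n)]
  have hpar : (2 : Int) ^ (n - i) * (x / 2 ^ n) = 2 ^ (n - i - 1) * (x / 2 ^ n) * 2 := by
    have hp : (2 : Int) ^ (n - i) = 2 ^ (n - i - 1) * 2 := by
      rw [← pow_succ]; congr 1; omega
    rw [hp]; ring
  conv_lhs => rw [hsplit]
  rw [Int.add_mul_ediv_right _ _ (by positivity : (0:Int) < 2 ^ i).ne']
  rw [hpar, Int.add_mul_emod_self_right, pvCastDivMod]

lemma pvInt2bv_eq (x : Int) (n : Nat) :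
    pvInt2bv x n = (pvBitsL n ((PySem.Int.mod x (2 ^ n)).toNat)).reverse := by
  rw [pvInt2bv, pvBitsL_map, ← List.map_reverse]
  apply List.map_congr_left
  intro i hi
  rw [List.mem_reverse, List.mem_range] at hi
  rw [pvIntBit x n i hi]
  simp only [Nat.cast_eq_one]

-- toNat of the Python mod
lemma pvModSmall (v n : Nat) (h : v < 2 ^ n) :
    (PySem.Int.mod ((v : Nat) : Int) (2 ^ n)).toNat = v := by
  rw [PySem.Int.mod_eq_emod_of_pos (by positivity),
    show ((v : Nat) : Int) % (2 : Int) ^ n = (((v % 2 ^ n : Nat)) : Int) from by push_cast; ring,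
    Int.toNat_natCast, Nat.mod_eq_of_lt h]

lemma pvModPlus (v n : Nat) :
    (PySem.Int.mod (((v : Nat) : Int) + 1) (2 ^ n)).toNat = (v + 1) % 2 ^ n := by
  rw [PySem.Int.mod_eq_emod_of_pos (by positivity),
    show ((v : Nat) : Int) + 1 = (((v + 1 : Nat)) : Int) from by push_cast; ring,
    show (((v + 1 : Nat)) : Int) % (2 : Int) ^ n = ((((v + 1) % 2 ^ n : Nat)) : Int) from by
      push_cast; ring,
    Int.toNat_natCast]

lemma pvModMinus (v n : Nat) :
    (PySem.Int.mod (((v : Nat) : Int) + (-1)) (2 ^ n)).toNat = (v + (2 ^ n - 1)) % 2 ^ n := by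
  rw [PySem.Int.mod_eq_emod_of_pos (by positivity)]
  have hp := Nat.one_le_two_pow (n := n)
  have h1 : ((v : Int) + (-1)) % ((2 : Int) ^ n) = ((v : Int) + (-1) + 2 ^ n) % ((2 : Int) ^ n) :=
    (Int.add_mul_emod_self_right ((v : Int) + (-1)) 1 (2 ^ n)).symm.trans (by ring_nf)
  have h2 : ((v : Int) + (-1) + 2 ^ n) = ((v + (2 ^ n - 1) : Nat) : Int) := by
    push_cast [hp]; ring
  rw [h1, h2,
    show (((v + (2 ^ n - 1) : Nat)) : Int) % (2 : Int) ^ n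
      = ((((v + (2 ^ n - 1)) % 2 ^ n : Nat)) : Int) from by push_cast; ring,
    Int.toNat_natCast]

-- A's gray helpers compute pvG2b
lemma pvGraytobinGo_eq : ∀ (mask x : Nat), pvGraytobinGo x mask = x ^^^ pvG2b mask := by
  intro mask
  induction mask using Nat.strong_induction_on with
  | _ mask ih =>
    intro x
    rw [pvGraytobinGo]
    by_cases h : mask = 0
    · simp [h, pvG2b_zero]
    · rw [if_neg h]
      have hlt : mask >>> 1 < mask := by
        simpa [Nat.shiftRight_one] using Nat.div_lt_self (Nat.pos_of_ne_zero h) one_lt_two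
      rw [ih (mask >>> 1) hlt (x ^^^ mask), Nat.shiftRight_one, Nat.xor_assoc, ← pvG2b_def]

lemma pvGraytobin_eq (x : Nat) : pvGraytobin x = pvG2b x := by
  rw [pvGraytobin, pvGraytobinGo_eq, Nat.shiftRight_one, ← pvG2b_def]

-- the two branches, assembled
lemma pvBinCase (bv : List Bool) (inc : Int) (h : inc = 1 ∨ inc = -1) :
    pvInt2bv (((pvBv2int bv : Nat) : Int) + inc) bv.length
      = (pvRippleRev inc true bv.reverse).1.reverse := by
  have hlen : bv.reverse.length = bv.length := List.length_reverse
  have hrlen : (pvRippleRev inc true bv.reverse).1.length = bv.length := by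
    rw [pvRippleRev_length, hlen]
  rw [pvInt2bv_eq, pvBv2int_eq]
  rcases h with h | h <;> subst h
  · rw [pvModPlus]
    have := pvRipple_one bv.reverse
    rw [hlen] at this
    rw [← this, ← hrlen, pvBitsL_valL]
  · rw [pvModMinus]
    have := pvRipple_neg bv.reverse
    rw [hlen] at this
    rw [← this, ← hrlen, pvBitsL_valL]

lemma pvGrayCase (bv : List Bool) (inc : Int) (h : inc = 1 ∨ inc = -1) :
    pvInt2bv ((pvBintogray (PySem.Int.mod (((pvGraytobin (pvBv2int bv) : Nat) : Int) + inc)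
        (2 ^ bv.length)).toNat : Nat) : Int) bv.length
      = pvGrayEncode false ((pvRippleRev inc true (pvGrayDecode false bv).reverse).1.reverse) := by
  have hvt : pvValL bv.reverse < 2 ^ bv.length := by simpa using pvValL_lt bv.reverse
  have hg : pvG2b (pvValL bv.reverse) < 2 ^ bv.length := pvG2b_lt _ _ hvt
  set V : Nat := (PySem.Int.mod (((pvGraytobin (pvBv2int bv) : Nat) : Int) + inc)
      (2 ^ bv.length)).toNat with hV
  have hVval : V = (pvG2b (pvValL bv.reverse)
      + (if inc = 1 then 1 else 2 ^ bv.length - 1)) % 2 ^ bv.length := by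
    rw [hV, pvBv2int_eq, pvGraytobin_eq]
    rcases h with h | h <;> subst h
    · rw [pvModPlus]
      simp
    · rw [pvModMinus]
      norm_num
  have hVlt : V < 2 ^ bv.length := by
    rw [hVval]; exact Nat.mod_lt _ (Nat.two_pow_pos _)
  have hW : pvBintogray V = V ^^^ V / 2 := by rw [pvBintogray, Nat.shiftRight_one]
  have hWlt : pvBintogray V < 2 ^ bv.length := by
    rw [hW]; exact pvXorLt _ _ _ hVlt (lt_of_le_of_lt (Nat.div_le_self V 2) hVlt)
  rw [pvInt2bv_eq, pvModSmall _ _ hWlt]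
  have hdlen : (pvGrayDecode false bv).reverse.length = bv.length := by
    rw [List.length_reverse, pvGrayDecode_length]
  have hdval : pvValL (pvGrayDecode false bv).reverse = pvG2b (pvValL bv.reverse) := by
    rw [pvDecode_val]; simp
  have heval : pvValL (pvRippleRev inc true (pvGrayDecode false bv).reverse).1
      = V := by
    rcases h with h | h <;> subst h
    · rw [pvRipple_one, hdlen, hdval, hVval]; simp
    · rw [pvRipple_neg, hdlen, hdval, hVval]; norm_num
  have helen : (pvRippleRev inc true (pvGrayDecode false bv).reverse).1.length = bv.length := by
    rw [pvRippleRev_length, hdlen]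
  have hout : pvValL ((pvGrayEncode false
      ((pvRippleRev inc true (pvGrayDecode false bv).reverse).1.reverse)).reverse)
      = pvBintogray V := by
    rw [pvEncode_val, hW]
    simp only [List.reverse_reverse, heval, List.length_reverse]
    norm_num
  have houtlen : ((pvGrayEncode false
      ((pvRippleRev inc true (pvGrayDecode false bv).reverse).1.reverse)).reverse).length
      = bv.length := by
    rw [List.length_reverse, pvGrayEncode_length, List.length_reverse, helen]
  rw [← hout, ← houtlen, pvBitsL_valL, List.reverse_reverse]

-- overflow carry ↔ replicate shape
lemma pvAllIff (bv : List Bool) (c : Bool) :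
    bv.all (fun b => b = c) = true ↔ bv = List.replicate bv.length c := by
  rw [List.eq_replicate_iff, List.all_eq_true]
  simp

lemma pvCarryOne_iff (bv : List Bool) :
    (pvRippleRev 1 true bv.reverse).2 = true ↔ bv = List.replicate bv.length true := by
  rw [pvCarry_one, ← pvAllIff bv true]
  simp [List.all_eq_true]

lemma pvCarryNeg_iff (bv : List Bool) :
    (pvRippleRev (-1) true bv.reverse).2 = true ↔ bv = List.replicate bv.length false := by
  rw [pvCarry_neg, ← pvAllIff bv false]
  simp [List.all_eq_true]

-- ===== VERDICT (by name: the statement is the Claim_ definition above) =====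
theorem increment_bv_spec : Claim_equal_increment_bv := by
  intro bv inc g s _ hpre
  obtain ⟨hp, hover⟩ := hpre
  unfold Spec_increment_bv increment_bv increment_bv_alt
  cases g
  · -- binary branch
    simp only [Bool.false_eq_true, if_false]
    by_cases h1 : bv = List.replicate bv.length true ∧ 0 < inc
    · -- all-ones, incrementing: saturate (the raise is outside Pre_)
      rw [if_pos h1]
      have hc : (pvRippleRev inc true bv.reverse).2 = true := by
        have hinc : inc = 1 := by rcases hp with h | h <;> omega
        subst hinc
        exact (pvCarryOne_iff bv).mpr h1.1
      rw [hc]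
      simp
    · by_cases h2 : bv = List.replicate bv.length false ∧ inc < 0
      · -- all-zeros, decrementing: saturate (the raise is outside Pre_)
        rw [if_neg h1, if_pos h2]
        have hc : (pvRippleRev inc true bv.reverse).2 = true := by
          have hinc : inc = -1 := by rcases hp with h | h <;> omega
          subst hinc
          exact (pvCarryNeg_iff bv).mpr h2.1
        rw [hc]
        simp
      · -- interior: both wrap to value + inc
        rw [if_neg h1, if_neg h2]
        have hc : (pvRippleRev inc true bv.reverse).2 = false := by
          rcases hp with h | h <;> subst h
          · rw [← Bool.not_eq_true, pvCarryOne_iff]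
            intro hrep; exact h1 ⟨hrep, by omega⟩
          · rw [← Bool.not_eq_true, pvCarryNeg_iff]
            intro hrep; exact h2 ⟨hrep, by omega⟩
        rw [hc]
        simp only [Bool.false_eq_true, if_false]
        exact pvBinCase bv inc hp
  · -- gray branch
    simp only [if_true]
    exact pvGrayCase bv inc hp
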